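-- pv_equiv track=rewrite | github.com/jmagar/transdock | backend/zfs_operations/services/dataset_service.py | _parse_kstat_data
-- ===== SOURCE A (Python) =====
-- from typing import List, Optional, Dict, Any
--
-- def _parse_kstat_data(kstat_output: str) -> Dict[str, int]:
--     """Parse ZFS kstat data for I/O statistics"""
--     iostats = {
--         "reads": 0,
--         "writes": 0,
--         "read_bytes": 0,
--         "write_bytes": 0
--     }
--
--     try:
--         for line in kstat_output.strip().split('\n'):
--             if line.strip() and not line.startswith('#'):
--                 parts = line.split()
--                 if len(parts) >= 3:
--                     key = parts[0]
--                     value = int(parts[2]) if parts[2].isdigit() else 0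
--
--                     if key == "reads":
--                         iostats["reads"] = value
--                     elif key == "writes":
--                         iostats["writes"] = value
--                     elif key == "nread":
--                         iostats["read_bytes"] = value
--                     elif key == "nwritten":
--                         iostats["write_bytes"] = value
--     except Exception:
--         pass  # Return zeros on parse error
--
--     return iostats
-- ===== SOURCE B (Python) =====
-- def _parse_kstat_data(kstat_output: str):
--     """Parse ZFS kstat data for I/O statistics.
--
--     Different decomposition from the original: first extract the (name, token)
--     rows of all valid lines, then answer each of the four fields by an
--     independent back-to-front search for the last occurrence of its kstat name
--     (equivalent to the original's forward overwrite, where the last line wins).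
--     """
--     rows = []
--     for line in kstat_output.strip().split('\n'):
--         if line.strip() and not line.startswith('#'):
--             parts = line.split()
--             if len(parts) >= 3:
--                 rows.append((parts[0], parts[2]))
--
--     def last_value(name):
--         for key, tok in reversed(rows):
--             if key == name:
--                 return int(tok) if tok.isdigit() else 0
--         return 0
--
--     return {
--         "reads": last_value("reads"),
--         "writes": last_value("writes"),
--         "read_bytes": last_value("nread"),
--         "write_bytes": last_value("nwritten"),
--     }
-- ===== Notes on version B (the rewrite author's own statement) =====
-- stated objective: alternative
-- what changed: A's single forward pass that mutates a four-field dict per line is replaced by a row-extraction pass followed by four independent backward linear searches, each returning the last valid line's value for its kstat name.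
import Mathlib
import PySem

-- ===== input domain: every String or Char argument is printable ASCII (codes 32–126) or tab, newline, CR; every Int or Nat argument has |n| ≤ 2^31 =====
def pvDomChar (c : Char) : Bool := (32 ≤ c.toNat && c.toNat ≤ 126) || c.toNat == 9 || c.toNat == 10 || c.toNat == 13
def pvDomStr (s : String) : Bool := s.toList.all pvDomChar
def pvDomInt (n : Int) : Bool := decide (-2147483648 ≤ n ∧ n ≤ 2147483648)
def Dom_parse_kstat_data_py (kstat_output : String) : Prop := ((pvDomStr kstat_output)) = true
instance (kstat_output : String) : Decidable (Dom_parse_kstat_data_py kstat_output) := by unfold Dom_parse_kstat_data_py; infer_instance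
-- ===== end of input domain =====

-- B replaces A's single forward pass mutating a four-field dict by a row-extraction
-- pass plus four independent backward searches for each name's last value; an
-- alternative decomposition, same cost.


-- ===== PORT A =====
-- one loop iteration of A: filter the line, split it, dispatch parts[0] into one of the four fixed fields
def pkAStep (d : PySem.Dict String Int) (line : String) : PySem.Dict String Int :=
  if (PySem.Str.strip line != "") && !(PySem.Str.startswith line "#") then
    match PySem.Str.split₀ line with
    | key :: _ :: p2 :: _ =>
        -- int(parts[2]): guarded by isdigit, so ofStr? is some; .getD 0 only totalises
        let value : Int := if PySem.Str.strIsdigit p2 then (PySem.Int.ofStr? p2).getD 0 else 0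
        if key == "reads" then d.insert "reads" value
        else if key == "writes" then d.insert "writes" value
        else if key == "nread" then d.insert "read_bytes" value
        else if key == "nwritten" then d.insert "write_bytes" value
        else d
    | _ => d
  else d

def parse_kstat_data_py (kstat_output : String) : List (String × Int) :=
  -- split('\n') with a nonempty literal separator: split? is always some
  (((PySem.Str.split? (PySem.Str.strip kstat_output) "\n").getD []).foldl pkAStep
    ((((PySem.Dict.empty.insert "reads" 0).insert "writes" 0).insert "read_bytes" 0).insert "write_bytes" 0)).items

-- ===== PORT B =====
-- B's first loop: append (parts[0], parts[2]) of each valid line to the rows list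
def pkRowStep (acc : List (String × String)) (line : String) : List (String × String) :=
  if (PySem.Str.strip line != "") && !(PySem.Str.startswith line "#") then
    match PySem.Str.split₀ line with
    | k :: _ :: p2 :: _ => acc ++ [(k, p2)]
    | _ => acc
  else acc

-- B's last_value: first match over the reversed rows, parsing only the hit; 0 if absent
def pkLastValue (name : String) : List (String × String) → Int
  | [] => 0
  | (k, tok) :: rest =>
      if k = name then (if PySem.Str.strIsdigit tok then (PySem.Int.ofStr? tok).getD 0 else 0)
      else pkLastValue name rest

def parse_kstat_data_py_alt (kstat_output : String) : List (String × Int) :=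
  let rows := ((PySem.Str.split? (PySem.Str.strip kstat_output) "\n").getD []).foldl pkRowStep []
  [("reads", pkLastValue "reads" rows.reverse),
   ("writes", pkLastValue "writes" rows.reverse),
   ("read_bytes", pkLastValue "nread" rows.reverse),
   ("write_bytes", pkLastValue "nwritten" rows.reverse)]

-- ===== PRECONDITION & SPEC =====
def Spec_parse_kstat_data_py (kstat_output : String) (out : List (String × Int)) : Prop := out = parse_kstat_data_py_alt kstat_output
instance (kstat_output : String) (out : List (String × Int)) : Decidable (Spec_parse_kstat_data_py kstat_output out) := by unfold Spec_parse_kstat_data_py; infer_instance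

-- ===== CLAIM =====
def Claim_equal_parse_kstat_data_py : Prop := ∀ (kstat_output : String), Dom_parse_kstat_data_py kstat_output → Spec_parse_kstat_data_py kstat_output (parse_kstat_data_py kstat_output)

-- ===== LEMMAS AND PROOFS =====
-- the (name, token) row a line contributes, if any (proof-side view of both loops' guard)
def pkRow (line : String) : Option (String × String) :=
  if (PySem.Str.strip line != "") && !(PySem.Str.startswith line "#") then
    match PySem.Str.split₀ line with
    | k :: _ :: p2 :: _ => some (k, p2)
    | _ => none
  else none

-- pkLastValue with an explicit fallback, to compose searches over appended lists
def pkLVO (name : String) (cur : Int) : List (String × String) → Int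
  | [] => cur
  | (k, tok) :: rest =>
      if k = name then (if PySem.Str.strIsdigit tok then (PySem.Int.ofStr? tok).getD 0 else 0)
      else pkLVO name cur rest

theorem pkLastValue_eq_pkLVO (name : String) (xs : List (String × String)) :
    pkLastValue name xs = pkLVO name 0 xs := by
  induction xs with
  | nil => rfl
  | cons h t ih => cases h; simp [pkLastValue, pkLVO, ih]

theorem pkLVO_append (name : String) (cur : Int) (xs ys : List (String × String)) :
    pkLVO name cur (xs ++ ys) = pkLVO name (pkLVO name cur ys) xs := by
  induction xs with
  | nil => rfl
  | cons h t ih => cases h; simp [pkLVO, ih]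

theorem pkRowStep_foldl (ls : List String) (acc : List (String × String)) :
    ls.foldl pkRowStep acc = acc ++ ls.filterMap pkRow := by
  induction ls generalizing acc with
  | nil => simp
  | cons l t ih =>
    simp only [List.foldl_cons, ih, List.filterMap_cons]
    unfold pkRowStep pkRow
    by_cases hg : ((PySem.Str.strip l != "") && !(PySem.Str.startswith l "#")) = true
    · simp only [hg, if_true]
      cases hps : PySem.Str.split₀ l with
      | nil => simp
      | cons k rest =>
        cases rest with
        | nil => simp
        | cons b rest2 =>
          cases rest2 with
          | nil => simp
          | cons p2 rest3 => simp
    · simp only [Bool.not_eq_true] at hg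
      rw [hg]; simp

-- A's four-field dict as a literal, with symbolic values
def pkD4 (a b c d : Int) : PySem.Dict String Int :=
  PySem.Dict.mk [("reads", a), ("writes", b), ("read_bytes", c), ("write_bytes", d)]

theorem pkD4_insert_reads (a b c d v : Int) : (pkD4 a b c d).insert "reads" v = pkD4 v b c d := by
  apply PySem.Dict.ext; simp [pkD4, PySem.Dict.insert]
theorem pkD4_insert_writes (a b c d v : Int) : (pkD4 a b c d).insert "writes" v = pkD4 a v c d := by
  apply PySem.Dict.ext; simp [pkD4, PySem.Dict.insert]
theorem pkD4_insert_rb (a b c d v : Int) : (pkD4 a b c d).insert "read_bytes" v = pkD4 a b v d := by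
  apply PySem.Dict.ext; simp [pkD4, PySem.Dict.insert]
theorem pkD4_insert_wb (a b c d v : Int) : (pkD4 a b c d).insert "write_bytes" v = pkD4 a b c v := by
  apply PySem.Dict.ext; simp [pkD4, PySem.Dict.insert]

-- one A-step on the four-field dict = per-field last-value update by the line's row
theorem pkStep4 (l : String) (a b c d : Int) :
    pkAStep (pkD4 a b c d) l =
      pkD4 (pkLVO "reads" a (pkRow l).toList) (pkLVO "writes" b (pkRow l).toList)
           (pkLVO "nread" c (pkRow l).toList) (pkLVO "nwritten" d (pkRow l).toList) := by
  unfold pkAStep pkRow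
  by_cases hg : ((PySem.Str.strip l != "") && !(PySem.Str.startswith l "#")) = true
  · simp only [hg, if_true]
    cases hps : PySem.Str.split₀ l with
    | nil => simp [pkLVO]
    | cons key rest =>
      cases rest with
      | nil => simp [pkLVO]
      | cons x rest2 =>
        cases rest2 with
        | nil => simp [pkLVO]
        | cons p2 rest3 =>
          by_cases h1 : key = "reads"
          · subst h1; simp [pkD4_insert_reads, pkLVO]
          · by_cases h2 : key = "writes"
            · subst h2; simp [pkD4_insert_writes, pkLVO, h1]
            · by_cases h3 : key = "nread"
              · subst h3; simp [pkD4_insert_rb, pkLVO, h1, h2]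
              · by_cases h4 : key = "nwritten"
                · subst h4; simp [pkD4_insert_wb, pkLVO, h1, h2, h3]
                · simp [pkLVO, h1, h2, h3, h4]
  · simp only [Bool.not_eq_true] at hg
    rw [hg]
    simp [pkLVO]

-- the simulation: A's fold over lines computes, in each field, the last-matching-row value
theorem pkFold_sim (ls : List String) (a b c d : Int) :
    ls.foldl pkAStep (pkD4 a b c d) =
      pkD4 (pkLVO "reads" a (ls.filterMap pkRow).reverse)
           (pkLVO "writes" b (ls.filterMap pkRow).reverse)
           (pkLVO "nread" c (ls.filterMap pkRow).reverse)
           (pkLVO "nwritten" d (ls.filterMap pkRow).reverse) := by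
  induction ls generalizing a b c d with
  | nil => simp [pkLVO]
  | cons l t ih =>
    rw [List.foldl_cons, pkStep4, ih]
    cases h : pkRow l with
    | none => simp [h, pkLVO]
    | some r =>
      obtain ⟨k, tok⟩ := r
      simp [h, List.reverse_cons, pkLVO_append, pkLVO]

-- ===== VERDICT =====
theorem parse_kstat_data_py_spec : Claim_equal_parse_kstat_data_py := by
  intro s _
  unfold Spec_parse_kstat_data_py parse_kstat_data_py parse_kstat_data_py_alt
  have hinit :
      ((((PySem.Dict.empty.insert "reads" 0).insert "writes" 0).insert "read_bytes" 0).insert "write_bytes" (0 : Int))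
        = pkD4 0 0 0 0 := by decide
  rw [hinit, pkFold_sim]
  simp [pkD4, pkRowStep_foldl, pkLastValue_eq_pkLVO]
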